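-- pv_equiv track=rewrite | github.com/ravalrupalj/BrainTeasers | Edabit/String_Factoring.py | string_factor
-- ===== SOURCE A (Python) =====
-- def string_factor(lst):
--     s=''
--     for i in sorted(set(lst)):
--         total=lst.count(i)
--         if total==1:
--             s = s + str(i) +" x "
--         else:
--             s=s+str(i)+"^"+str(total)+" x "
--     return s[:-3]
-- ===== SOURCE B (Python) =====
-- def _fmt(v, c):
--     return str(v) if c == 1 else str(v) + "^" + str(c)
--
--
-- def string_factor(lst):
--     # Sort once, then a single run-length sweep over the sorted list;
--     # join the formatted groups with " x ".
--     parts = []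
--     cur = None
--     cnt = 0
--     for v in sorted(lst):
--         if cnt and v == cur:
--             cnt += 1
--         else:
--             if cnt:
--                 parts.append(_fmt(cur, cnt))
--             cur, cnt = v, 1
--     if cnt:
--         parts.append(_fmt(cur, cnt))
--     return " x ".join(parts)
-- ===== Notes on version B (the rewrite author's own statement) =====
-- stated objective: faster
-- what changed: Replaces sorted(set(lst)) with a per-key lst.count scan by one sort of the whole list followed by a single run-length sweep over the sorted values, joining the formatted groups with ' x ' instead of appending separators and slicing the last one off.
import Mathlib
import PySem

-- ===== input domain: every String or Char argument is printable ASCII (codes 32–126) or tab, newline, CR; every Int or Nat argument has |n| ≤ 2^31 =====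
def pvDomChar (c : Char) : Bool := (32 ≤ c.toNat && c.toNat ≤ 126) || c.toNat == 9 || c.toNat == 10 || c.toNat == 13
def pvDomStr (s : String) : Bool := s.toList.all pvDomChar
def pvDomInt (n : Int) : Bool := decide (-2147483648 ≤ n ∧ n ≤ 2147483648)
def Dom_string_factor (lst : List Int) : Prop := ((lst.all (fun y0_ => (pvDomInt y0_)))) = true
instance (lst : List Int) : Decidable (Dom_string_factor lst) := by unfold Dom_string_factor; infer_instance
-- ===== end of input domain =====

-- B replaces A's sorted(set(lst)) + lst.count(i) per key by one sort and a single
-- run-length sweep whose formatted groups are joined with " x " (objective: faster, constant-factor).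

-- ===== PORT A =====
def string_factor (lst : List Int) : String :=
  let s := (PySem.List.sorted (PySem.Set.ofList lst) (fun x => x) false).foldl
    (fun s i =>
      let total : Int := (PySem.List.count lst i : Int)
      if total = 1 then s ++ PySem.Int.toStr i ++ " x "
      else s ++ PySem.Int.toStr i ++ "^" ++ PySem.Int.toStr total ++ " x ")
    ""
  PySem.Str.slice s none (some (-3))

-- ===== PORT B =====
-- _fmt(v, c)
def pvFmt (v c : Int) : String :=
  if c = 1 then PySem.Int.toStr v
  else PySem.Int.toStr v ++ "^" ++ PySem.Int.toStr c

-- the run-length sweep of Source B's for-loop (cur = current value, cnt = its running count)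
def pvRuns (cur cnt : Int) : List Int → List (Int × Int)
  | [] => [(cur, cnt)]
  | v :: rest =>
      if v = cur then pvRuns cur (cnt + 1) rest
      else (cur, cnt) :: pvRuns v 1 rest

-- the loop including its cnt = 0 start state (parts list produced by the sweep)
def pvGroups (ys : List Int) : List (Int × Int) :=
  match ys with
  | [] => []
  | v :: rest => pvRuns v 1 rest

def string_factor_alt (lst : List Int) : String :=
  PySem.Str.join " x "
    ((pvGroups (PySem.List.sorted lst (fun x => x) false)).map (fun p => pvFmt p.1 p.2))

-- ===== PRECONDITION & SPEC =====
def Spec_string_factor (lst : List Int) (out : String) : Prop := out = string_factor_alt lst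
instance (lst : List Int) (out : String) : Decidable (Spec_string_factor lst out) := by unfold Spec_string_factor; infer_instance

-- ===== CLAIM (what is proved, stated in full; the proofs are below) =====
def Claim_equal_string_factor : Prop := ∀ (lst : List Int), Dom_string_factor lst → Spec_string_factor lst (string_factor lst)

-- ===== LEMMAS AND PROOFS =====

-- keys produced by the sweep are strictly increasing and bounded below by cur
theorem pvRuns_keys_sorted : ∀ (rest : List Int) (cur k : Int),
    rest.Pairwise (· ≤ ·) → (∀ x ∈ rest, cur ≤ x) →
    ((pvRuns cur k rest).map Prod.fst).Pairwise (· < ·) ∧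
      ∀ y ∈ (pvRuns cur k rest).map Prod.fst, cur ≤ y := by
  intro rest
  induction rest with
  | nil => intro cur k _ _; simp [pvRuns]
  | cons v rest ih =>
    intro cur k h hl
    rw [List.pairwise_cons] at h
    by_cases hv : v = cur
    · subst hv
      simpa [pvRuns] using ih v (k + 1) h.2 h.1
    · have hcv : cur < v := lt_of_le_of_ne (hl v (by simp)) (Ne.symm hv)
      have := ih v 1 h.2 h.1
      simp only [pvRuns, if_neg hv, List.map_cons, List.pairwise_cons, List.mem_cons]
      refine ⟨⟨fun y hy => lt_of_lt_of_le hcv (this.2 y hy), this.1⟩, ?_⟩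
      rintro y (rfl | hy)
      · exact le_refl _
      · exact le_of_lt (lt_of_lt_of_le hcv (this.2 y hy))

theorem pvRuns_keys_mem : ∀ (rest : List Int) (cur k x : Int),
    x ∈ (pvRuns cur k rest).map Prod.fst ↔ x = cur ∨ x ∈ rest := by
  intro rest
  induction rest with
  | nil => intro cur k x; simp [pvRuns]
  | cons v rest ih =>
    intro cur k x
    by_cases hv : v = cur
    · subst hv
      simp [pvRuns, ih]
    · simp [pvRuns, if_neg hv, ih]

-- counts produced by the sweep
theorem pvRuns_counts : ∀ (rest : List Int) (cur k : Int),
    rest.Pairwise (· ≤ ·) → (∀ x ∈ rest, cur ≤ x) →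
    ∀ p ∈ pvRuns cur k rest,
      (p.1 = cur → p.2 = k + (rest.count cur : Int)) ∧
      (p.1 ≠ cur → p.2 = (rest.count p.1 : Int)) := by
  intro rest
  induction rest with
  | nil => intro cur k _ _ p hp; simp [pvRuns] at hp; subst hp; simp
  | cons v rest ih =>
    intro cur k h hl p hp
    rw [List.pairwise_cons] at h
    by_cases hv : v = cur
    · subst hv
      simp only [pvRuns, if_pos rfl] at hp
      have := ih v (k + 1) h.2 h.1 p hp
      constructor
      · intro h1
        have := this.1 h1
        simp [List.count_cons, h1]
        omega
      · intro h1
        have := this.2 h1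
        simp [List.count_cons, Ne.symm h1]
        omega
    · have hcv : cur < v := lt_of_le_of_ne (hl v (by simp)) (Ne.symm hv)
      have hnotin : (v :: rest).count cur = 0 := by
        rw [List.count_eq_zero]
        intro hc
        rcases List.mem_cons.mp hc with rfl | hc
        · exact hv rfl
        · exact absurd (h.1 cur hc) (not_le.mpr hcv)
      simp only [pvRuns, if_neg hv, List.mem_cons] at hp
      rcases hp with rfl | hp
      · simp [hnotin]
      · have hge : v ≤ p.1 := by
          have := (pvRuns_keys_sorted rest v 1 h.2 h.1).2
          exact this p.1 (List.mem_map.mpr ⟨p, hp, rfl⟩)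
        have hne : p.1 ≠ cur := fun hc => absurd (hc ▸ hge) (not_le.mpr hcv)
        have := ih v 1 h.2 h.1 p hp
        refine ⟨fun hc => absurd hc hne, fun _ => ?_⟩
        by_cases hpv : p.1 = v
        · have := this.1 hpv
          simp [List.count_cons, hpv]
          omega
        · have := this.2 hpv
          simp [List.count_cons, Ne.symm hpv]
          omega

-- the three facts lifted to pvGroups
theorem pvGroups_keys_sorted (ys : List Int) (h : ys.Pairwise (· ≤ ·)) :
    ((pvGroups ys).map Prod.fst).Pairwise (· < ·) := by
  cases ys with
  | nil => simp [pvGroups]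
  | cons v rest =>
    rw [List.pairwise_cons] at h
    exact (pvRuns_keys_sorted rest v 1 h.2 h.1).1

theorem pvGroups_keys_mem (ys : List Int) (x : Int) :
    x ∈ (pvGroups ys).map Prod.fst ↔ x ∈ ys := by
  cases ys with
  | nil => simp [pvGroups]
  | cons v rest => simp [pvGroups, pvRuns_keys_mem]

theorem pvGroups_counts (ys : List Int) (h : ys.Pairwise (· ≤ ·)) :
    ∀ p ∈ pvGroups ys, p.2 = (ys.count p.1 : Int) := by
  cases ys with
  | nil => simp [pvGroups]
  | cons v rest =>
    intro p hp
    rw [List.pairwise_cons] at h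
    have := pvRuns_counts rest v 1 h.2 h.1 p hp
    by_cases hpv : p.1 = v
    · have := this.1 hpv
      simp [List.count_cons, hpv]
      omega
    · have := this.2 hpv
      simp [List.count_cons, Ne.symm hpv]
      omega

-- A's string loop, at the character-list level
theorem foldl_str_toList {α : Type} (f : α → String) :
    ∀ (l : List α) (acc : String),
      (l.foldl (fun s x => s ++ f x) acc).toList
        = acc.toList ++ l.flatMap (fun x => (f x).toList) := by
  intro l
  induction l with
  | nil => intro acc; simp
  | cons x l ih => intro acc; simp [List.foldl_cons, ih, String.toList_append]

-- dropping the final " x " of the concatenation = joining with " x "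
theorem strip_join (sep : List Char) (hsep : sep.length = 3) :
    ∀ (ps : List (List Char)),
      List.take ((ps.flatMap (fun p => p ++ sep)).length - 3)
          (ps.flatMap (fun p => p ++ sep)) = PySem.Chars.join sep ps := by
  intro ps
  induction ps with
  | nil => simp [PySem.Chars.join_nil]
  | cons p ps ih =>
    cases ps with
    | nil =>
      simp [PySem.Chars.join_singleton, hsep, List.take_append, List.take_of_length_le]
    | cons q rest =>
      have hR : 3 ≤ ((q :: rest).flatMap (fun p => p ++ sep)).length := by
        simp [List.flatMap_cons, hsep]
        omega
      have ha : (p :: q :: rest).flatMap (fun p => p ++ sep)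
          = (p ++ sep) ++ (q :: rest).flatMap (fun p => p ++ sep) := by
        simp [List.flatMap_cons]
      rw [PySem.Chars.join_cons_cons, ← ih, ha]
      have hlen : ((p ++ sep) ++ (q :: rest).flatMap (fun p => p ++ sep)).length - 3
          = (p ++ sep).length + (((q :: rest).flatMap (fun p => p ++ sep)).length - 3) := by
        simp [hsep]
        omega
      rw [hlen, List.take_append]
      simp [List.take_of_length_le, List.append_assoc, Nat.add_sub_cancel_left]

-- A's fold body rewritten through pvFmt
theorem body_eq (lst : List Int) :
    (fun (s : String) (i : Int) =>
      let total : Int := (PySem.List.count lst i : Int)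
      if total = 1 then s ++ PySem.Int.toStr i ++ " x "
      else s ++ PySem.Int.toStr i ++ "^" ++ PySem.Int.toStr total ++ " x ")
    = fun (s : String) (i : Int) => s ++ (pvFmt i (PySem.List.count lst i : Int) ++ " x ") := by
  funext s i
  simp only [pvFmt]
  split_ifs with h
  · simp [String.append_assoc]
  · simp [String.append_assoc]

-- ===== VERDICT (by name: the statement is the Claim_ definition above) =====
theorem string_factor_spec : Claim_equal_string_factor := by
  intro lst _
  unfold Spec_string_factor
  apply String.toList_injective
  -- abbreviations
  set ys := PySem.List.sorted lst (fun x => x) false with hys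
  have hysp : ys.Pairwise (· ≤ ·) := PySem.List.sorted_pairwise lst (fun x => x)
  have hperm : ys.Perm lst := PySem.List.sorted_perm lst (fun x => x) false
  -- the sorted distinct keys are exactly the keys of the run-length groups
  have hkeys : PySem.List.sorted (PySem.Set.ofList lst) (fun x => x) false
      = (pvGroups ys).map Prod.fst := by
    apply PySem.List.sorted_eq_of_perm_of_pairwise_lt
    · rw [List.perm_ext_iff_of_nodup
        (((pvGroups_keys_sorted ys hysp)).imp ne_of_lt) (PySem.Set.nodup_ofList lst)]
      intro a
      rw [pvGroups_keys_mem, PySem.Set.mem_ofList, List.Perm.mem_iff hperm]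
    · exact pvGroups_keys_sorted ys hysp
  -- A's side: concatenation of chunks, with the last " x " stripped
  rw [string_factor, body_eq lst, hkeys]
  rw [show (PySem.Str.slice
        ((List.map Prod.fst (pvGroups ys)).foldl
          (fun s i => s ++ (pvFmt i (PySem.List.count lst i : Int) ++ " x ")) "")
        none (some (-3))).toList
      = PySem.List.slice
        (((List.map Prod.fst (pvGroups ys)).foldl
          (fun s i => s ++ (pvFmt i (PySem.List.count lst i : Int) ++ " x ")) "").toList)
        none (some (-3)) from by
    simp [PySem.Str.toList_slice]]
  rw [PySem.List.slice_to_neg_ofNat _ 3 (by norm_num)]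
  rw [foldl_str_toList]
  -- B's side
  rw [string_factor_alt, PySem.Str.toList_join, ← hys]
  have hsep : (" x " : String).toList = [' ', 'x', ' '] := rfl
  rw [hsep]
  -- each chunk's characters = formatted group ++ separator
  have hchunk : ∀ i : Int,
      (pvFmt i (PySem.List.count lst i : Int) ++ (" x " : String)).toList
        = (pvFmt i (PySem.List.count lst i : Int)).toList ++ [' ', 'x', ' '] := by
    intro i; rw [String.toList_append, hsep]
  simp only [hchunk, List.nil_append]
  -- counts inside the groups are the list counts
  have hB : List.map String.toList (List.map (fun p : Int × Int => pvFmt p.1 p.2) (pvGroups ys))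
      = List.map (fun i => (pvFmt i (PySem.List.count lst i : Int)).toList)
          (List.map Prod.fst (pvGroups ys)) := by
    simp only [List.map_map]
    apply List.map_congr_left
    intro p hp
    have hc := pvGroups_counts ys hysp p hp
    have hcnt : ys.count p.1 = lst.count p.1 := List.Perm.count_eq hperm p.1
    simp only [Function.comp, PySem.List.count]
    rw [hc, hcnt]
  rw [hB]
  -- strip the trailing separator vs join
  have hsj := strip_join [' ', 'x', ' '] rfl
    ((List.map Prod.fst (pvGroups ys)).map (fun i => (pvFmt i (PySem.List.count lst i : Int)).toList))
  rw [List.flatMap_map] at hsj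
  -- (composition already beta-reduced)
  have h0 : ("" : String).toList = [] := rfl
  rw [h0, List.nil_append]
  exact hsj
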